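/- GENERATED by farm/mkstatement.py from design/units.tsv (unit `vorbis_finish_frame`) and the Specs of Vorbis/Spec/*.lean — do not edit.
   THE STATEMENT of the proof unit `vorbis_finish_frame`: the function `vorbis_finish_frame` (141 instructions) satisfies its contract,
   given the contracts of its callees. What the names mean: Vorbis/Spec/Basic.lean. The theorem to prove:
   `theorem vorbis_finish_frame_ok : Vorbis.Spec.vorbis_finish_frame.Statement`. -/
import Vorbis.Spec.Mdct
import Vorbis.Spec.Top
namespace Vorbis.Spec.vorbis_finish_frame
open X86 X86.User Asan

/-- The statement of unit `vorbis_finish_frame`. -/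
def Statement : Prop :=
  ∀ (Lay : Layout) (_hLay : Lay.hi = 0x1000000) (μ : Microarch) (_hμ : UserX.MicroOK μ) (u₀ : State)
    (_hcode : HasCodeNat Lay u₀ Vorbis.L.vorbis_finish_frame.entry Vorbis.Code.code_vorbis_finish_frame.nat Vorbis.L.vorbis_finish_frame.size)
    (_h_asan_load4_noabort : Asan.SmallCheck Lay μ Vorbis.WayInv (Vorbis.CodeOK u₀) [.rax, .rcx, .rdx] 4 Vorbis.L.__asan_load4_noabort.entry)
    (_h_get_window : ∀ (others : List Obj) (frames : List (Nat × FrameLayout)), Calls Lay μ Vorbis.WayInv (Vorbis.conv u₀) Vorbis.L.get_window.entry (Vorbis.Spec.get_window.spec others frames))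
    (_h_asan_load8_noabort : Asan.SmallCheck Lay μ Vorbis.WayInv (Vorbis.CodeOK u₀) [.rax, .rcx, .rdx] 8 Vorbis.L.__asan_load8_noabort.entry)
    (_h_asan_store4_noabort : Asan.SmallCheck Lay μ Vorbis.WayInv (Vorbis.CodeOK u₀) [.rax, .rcx, .rdx] 4 Vorbis.L.__asan_store4_noabort.entry),
    ∀ (others : List Obj) (frames : List (Nat × FrameLayout)) (len : Nat) (A : Arena) (stored room : Int) (ysz : Nat → Nat), Calls Lay μ Vorbis.WayInv (Vorbis.conv u₀) Vorbis.L.vorbis_finish_frame.entry (Vorbis.Spec.vorbis_finish_frame.spec others frames len A stored room ysz)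

end Vorbis.Spec.vorbis_finish_frame
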